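-- pv_equiv track=rewrite | github.com/travisjneuman/learn.python | projects/level-2/06-records-deduplicator/project.py | find_duplicate_groups
-- ===== SOURCE A (Python) =====
-- def make_dedup_key(record: dict[str, str], key_fields: list[str]) -> str:
--     """Create a deduplication key from specified fields.
--
--     The key is a pipe-separated string of normalised field values.
--     Normalisation: strip whitespace, lowercase.
--
--     This key is used to detect duplicates — two records with the
--     same key are considered duplicates.
--     """
--     parts = []
--     for field in key_fields:
--         value = record.get(field, "").strip().lower()
--         parts.append(value)
--     # Join with | so "a|b" is different from "ab".
--     return "|".join(parts)
--
-- def find_duplicate_groups(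
--     records: list[dict[str, str]], key_fields: list[str]
-- ) -> dict[str, list[dict]]:
--     """Group records that share the same dedup key.
--
--     Only returns groups with more than one record (actual duplicates).
--     Uses a dict comprehension to filter.
--     """
--     groups: dict[str, list[dict]] = {}
--     for record in records:
--         key = make_dedup_key(record, key_fields)
--         groups.setdefault(key, []).append(record)
--
--     # Dict comprehension — keep only groups with duplicates.
--     return {k: v for k, v in groups.items() if len(v) > 1}
-- ===== SOURCE B (Python) =====
-- def find_duplicate_groups(records, key_fields):
--     """No hashing/grouping dict: compute every key once, then for each FIRST
--     occurrence of a key gather its whole group by a direct scan (quadratic)."""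
--     keys = [
--         "|".join(r.get(f, "").strip().lower() for f in key_fields)
--         for r in records
--     ]
--     result = {}
--     for i, k in enumerate(keys):
--         if k in keys[:i]:
--             continue  # not the first occurrence of this key
--         group = [r for r, kk in zip(records, keys) if kk == k]
--         if len(group) > 1:
--             result[k] = group
--     return result
-- ===== Notes on version B (the rewrite author's own statement) =====
-- stated objective: alternative
-- what changed: B abandons the dict-grouping pass entirely: it precomputes the key list, detects each key's first occurrence by a prefix test, and gathers that key's group by a direct scan over all records (quadratic nested scans instead of hash grouping).
import Mathlib
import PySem

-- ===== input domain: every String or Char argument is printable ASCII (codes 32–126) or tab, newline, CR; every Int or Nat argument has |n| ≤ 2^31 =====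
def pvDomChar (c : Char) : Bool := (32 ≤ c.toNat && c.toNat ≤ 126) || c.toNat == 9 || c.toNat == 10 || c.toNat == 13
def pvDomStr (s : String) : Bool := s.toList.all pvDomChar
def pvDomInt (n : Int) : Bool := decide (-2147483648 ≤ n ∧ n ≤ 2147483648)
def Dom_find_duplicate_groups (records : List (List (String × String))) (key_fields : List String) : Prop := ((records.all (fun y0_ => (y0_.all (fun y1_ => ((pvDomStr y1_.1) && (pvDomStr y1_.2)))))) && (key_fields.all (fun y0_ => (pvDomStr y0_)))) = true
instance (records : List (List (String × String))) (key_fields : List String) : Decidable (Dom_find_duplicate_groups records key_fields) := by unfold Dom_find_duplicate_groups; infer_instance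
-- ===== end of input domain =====

-- B drops the dict-grouping pass: it precomputes the key list, keeps each key's first
-- occurrence (prefix test), and gathers that key's group by a direct scan over all
-- records — quadratic nested scans instead of hash grouping (alternative algorithm).

-- ===== PORT A =====
def make_dedup_key (record : List (String × String)) (key_fields : List String) : String :=
  let parts := key_fields.foldl
    (fun parts field =>
      parts ++ [PySem.Str.lower (PySem.Str.strip ((PySem.Dict.mk record).getD field ""))])
    []
  PySem.Str.join "|" parts

def find_duplicate_groups (records : List (List (String × String))) (key_fields : List String) :
    List (String × List (List (String × String))) :=
  let groups : PySem.Dict String (List (List (String × String))) :=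
    records.foldl
      (fun g record => g.modify (make_dedup_key record key_fields) [] (fun v => v ++ [record]))
      PySem.Dict.empty
  groups.items.filter (fun kv => decide (kv.2.length > 1))

-- ===== PORT B =====
def pv_alt_key (r : List (String × String)) (key_fields : List String) : String :=
  PySem.Str.join "|"
    (key_fields.map (fun f => PySem.Str.lower (PySem.Str.strip ((PySem.Dict.mk r).getD f ""))))

def find_duplicate_groups_alt (records : List (List (String × String))) (key_fields : List String) :
    List (String × List (List (String × String))) :=
  let keys := records.map (fun r => pv_alt_key r key_fields)
  (PySem.List.enumerate keys 0).foldl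
    (fun result ik =>
      if ik.2 ∈ PySem.List.slice keys none (some ik.1) then result   -- k in keys[:i] → continue
      else
        let group := ((records.zip keys).filter (fun p => p.2 == ik.2)).map Prod.fst
        if group.length > 1 then result ++ [(ik.2, group)] else result)
    []

-- ===== PRECONDITION & SPEC =====
def Spec_find_duplicate_groups (records : List (List (String × String))) (key_fields : List String) (out : List (String × List (List (String × String)))) : Prop := out = find_duplicate_groups_alt records key_fields
instance (records : List (List (String × String))) (key_fields : List String) (out : List (String × List (List (String × String)))) : Decidable (Spec_find_duplicate_groups records key_fields out) := by unfold Spec_find_duplicate_groups; infer_instance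

-- ===== CLAIM (what is proved, stated in full; the proofs are below) =====
def Claim_equal_find_duplicate_groups : Prop := ∀ (records : List (List (String × String))) (key_fields : List String), Dom_find_duplicate_groups records key_fields → Spec_find_duplicate_groups records key_fields (find_duplicate_groups records key_fields)

-- ===== LEMMAS AND PROOFS =====

-- A's per-record key (loop with an accumulator) equals B's (a map), field for field.
theorem pv_key_eq (r : List (String × String)) (kf : List String) :
    make_dedup_key r kf = pv_alt_key r kf := by
  unfold make_dedup_key pv_alt_key
  simpa using congrArg (PySem.Str.join "|")
    (PySem.List.foldl_append_singleton_eq_map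
      (fun f => PySem.Str.lower (PySem.Str.strip ((PySem.Dict.mk r).getD f ""))) kf [])

theorem pv_dedup_snoc {α : Type} [DecidableEq α] (l : List α) (x : α) :
    PySem.List.dedup (l ++ [x]) =
      if x ∈ l then PySem.List.dedup l else PySem.List.dedup l ++ [x] := by
  simp only [PySem.List.dedup, PySem.Set.ofList, List.foldl_append, List.foldl_cons, List.foldl_nil]
  simp only [PySem.Set.add]
  have hc : (List.foldl PySem.Set.add PySem.Set.empty l).contains x = decide (x ∈ l) := by
    have h := PySem.Set.mem_ofList (y := x) (xs := l)
    simp only [PySem.Set.ofList, PySem.Set.empty] at h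
    simp only [PySem.Set.empty]
    simp [PySem.Set.contains, h]
  rw [hc]
  by_cases hx : x ∈ l <;> simp [hx]

-- A's grouping dict, read back as items, is a map over the deduped key list.
theorem pv_group_items (ps : List (String × List (String × String))) :
    (ps.foldl (fun d p => d.modify p.1 [] (fun v => v ++ [p.2]))
        (PySem.Dict.empty : PySem.Dict String (List (List (String × String))))).items
      = (PySem.List.dedup (ps.map Prod.fst)).map
          (fun k => (k, (ps.filter (fun p => p.1 == k)).map Prod.snd)) := by
  have hnd : ((ps.foldl (fun d p => d.modify p.1 [] (fun v => v ++ [p.2]))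
      (PySem.Dict.empty : PySem.Dict String (List (List (String × String))))).keys).Nodup := by
    exact PySem.Dict.nodup_keys_foldl_modify_key ps Prod.fst [] (fun d p v => v ++ [p.2]) PySem.Dict.empty PySem.Dict.nodup_keys_empty
  rw [PySem.Dict.items_eq_map_keys _ hnd []]
  have hkeys : (ps.foldl (fun d p => d.modify p.1 [] (fun v => v ++ [p.2]))
      (PySem.Dict.empty : PySem.Dict String (List (List (String × String))))).keys
      = PySem.List.dedup (ps.map Prod.fst) := by
    rw [PySem.Dict.keys_foldl_modify_key]
    simp [PySem.Dict.keys_empty, PySem.Set.update, PySem.List.dedup, PySem.Set.ofList]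
  rw [hkeys]
  apply List.map_congr_left
  intro k _
  rw [PySem.Dict.getD_foldl_modify_append]
  simp [PySem.Dict.getD_empty]

-- B's first-occurrence-gated fold over enumerate is a flatMap over the deduped key list.
theorem pv_enum_dedup {β : Type} (ks : List String) (g : String → List β) :
    (PySem.List.enumerate ks 0).foldl
        (fun res ik => if ik.2 ∈ PySem.List.slice ks none (some ik.1) then res else res ++ g ik.2)
        []
      = (PySem.List.dedup ks).flatMap g := by
  have hstep : (fun (res : List β) (ik : Int × String) =>
      if ik.2 ∈ PySem.List.slice ks none (some ik.1) then res else res ++ g ik.2)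
        = fun res ik => res ++ (if ik.2 ∈ PySem.List.slice ks none (some ik.1) then [] else g ik.2) := by
    funext res ik; split <;> simp
  rw [hstep, PySem.List.foldl_append_eq_flatMap]
  simp only [List.nil_append]
  clear hstep
  -- now a pure flatMap identity, by reverse induction on ks
  induction ks using List.reverseRecOn with
  | nil => rfl
  | append_singleton l x ih =>
    rw [PySem.List.enumerate_append, List.flatMap_append, pv_dedup_snoc]
    have hpref : (PySem.List.enumerate l 0).flatMap
        (fun ik => if ik.2 ∈ PySem.List.slice (l ++ [x]) none (some ik.1) then [] else g ik.2)
      = (PySem.List.enumerate l 0).flatMap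
        (fun ik => if ik.2 ∈ PySem.List.slice l none (some ik.1) then [] else g ik.2) := by
      simp only [List.flatMap_def]
      apply congrArg List.flatten
      apply List.map_congr_left
      intro ik hik
      obtain ⟨j, hj, hikj⟩ := (PySem.List.mem_enumerate_iff _ _ _).mp hik
      subst hikj
      have hs : PySem.List.slice (l ++ [x]) none (some ((0:Int) + j)) =
          PySem.List.slice l none (some ((0:Int) + j)) := by
        simp only [zero_add]
        rw [PySem.List.slice_to_natCast, PySem.List.slice_to_natCast,
            List.take_append_of_le_length (Nat.le_of_lt hj)]
      rw [hs]
    rw [hpref]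
    have hlast : (PySem.List.enumerate [x] ((0:Int) + l.length)).flatMap
        (fun ik => if ik.2 ∈ PySem.List.slice (l ++ [x]) none (some ik.1) then [] else g ik.2)
      = if x ∈ l then [] else g x := by
      simp only [PySem.List.enumerate_cons, PySem.List.enumerate_nil, List.flatMap_cons,
        List.flatMap_nil, List.append_nil]
      have hs : PySem.List.slice (l ++ [x]) none (some ((0:Int) + l.length)) = l := by
        simp only [zero_add]
        rw [PySem.List.slice_to_natCast, List.take_left]
      rw [hs]
    rw [hlast]
    by_cases hx : x ∈ l
    · simpa [hx] using ih
    · simp only [hx, ite_false]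
      rw [ih]
      simp

-- gated flatMap is filter-after-map
theorem pv_flatMap_filter {α β : Type} (l : List α) (f : α → β) (p : β → Bool) :
    l.flatMap (fun k => if p (f k) then [f k] else []) = (l.map f).filter p := by
  induction l with
  | nil => rfl
  | cons a l ih =>
    simp only [List.flatMap_cons, List.map_cons, List.filter_cons, ih]
    by_cases h : p (f a) <;> simp [h]

theorem pv_main (records : List (List (String × String))) (kf : List String) :
    find_duplicate_groups records kf = find_duplicate_groups_alt records kf := by
  simp only [find_duplicate_groups, find_duplicate_groups_alt, pv_key_eq]
  set key : List (String × String) → String := fun r => pv_alt_key r kf with hkey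
  set Ks := records.map key with hKs
  set grp : String → List (List (String × String)) :=
    fun k => ((records.zip Ks).filter (fun p => p.2 == k)).map Prod.fst with hgrpdef
  -- A's grouping loop as a loop over key-record pairs
  have hA : records.foldl
      (fun g r => g.modify (key r) [] (fun v => v ++ [r]))
      (PySem.Dict.empty : PySem.Dict String (List (List (String × String))))
      = (records.map (fun r => (key r, r))).foldl
          (fun g p => g.modify p.1 [] (fun v => v ++ [p.2])) PySem.Dict.empty := by
    rw [List.foldl_map]
  have hfst : (records.map (fun r => (key r, r))).map Prod.fst = Ks := by
    simp [hKs, List.map_map, Function.comp]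
  rw [hA, pv_group_items, hfst]
  -- B's fold step, written as an unconditional append of a gated chunk
  have hBfun : (fun (result : List (String × List (List (String × String)))) (ik : Int × String) =>
      if ik.2 ∈ PySem.List.slice Ks none (some ik.1) then result
      else if (grp ik.2).length > 1 then result ++ [(ik.2, grp ik.2)] else result)
      = fun result ik =>
        if ik.2 ∈ PySem.List.slice Ks none (some ik.1) then result
        else result ++ (if (grp ik.2).length > 1 then [(ik.2, grp ik.2)] else []) := by
    funext result ik
    by_cases h1 : ik.2 ∈ PySem.List.slice Ks none (some ik.1) <;>
      by_cases h2 : (grp ik.2).length > 1 <;> simp [h1, h2]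
  rw [hBfun, pv_enum_dedup Ks (fun k => if (grp k).length > 1 then [(k, grp k)] else [])]
  -- both group computations scan the same records
  have hgrp : ∀ k : String,
      (((records.map (fun r => (key r, r))).filter (fun p => p.1 == k)).map Prod.snd)
        = grp k := by
    intro k
    have hzip : records.zip Ks = records.map (fun r => (r, key r)) := by
      rw [hKs]
      exact List.map_prod_left_eq_zip.symm
    rw [hgrpdef, hzip]
    simp [List.filter_map, List.map_map, Function.comp_def]
  calc (List.filter (fun kv => decide (kv.2.length > 1))
          ((PySem.List.dedup Ks).map (fun k =>
            (k, ((records.map (fun r => (key r, r))).filter (fun p => p.1 == k)).map Prod.snd))))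
      = List.filter (fun kv => decide (kv.2.length > 1))
          ((PySem.List.dedup Ks).map (fun k => (k, grp k))) := by
        apply congrArg (List.filter _)
        apply List.map_congr_left
        intro k _
        rw [hgrp k]
    _ = (PySem.List.dedup Ks).flatMap (fun k => if (grp k).length > 1 then [(k, grp k)] else []) := by
        simpa using (pv_flatMap_filter (PySem.List.dedup Ks) (fun k => (k, grp k))
          (fun kv => decide (kv.2.length > 1))).symm

-- ===== VERDICT (by name: the statement is the Claim_ definition above) =====
theorem find_duplicate_groups_spec : Claim_equal_find_duplicate_groups := by
  intro records kf _
  unfold Spec_find_duplicate_groups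
  exact pv_main records kf
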